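-- pv_equiv track=rewrite | github.com/Delafu7/EjerciciosLogicos-Python | Nivel Medio/CicloChino.py | sexagenarioChino
-- ===== SOURCE A (Python) =====
-- def crearZodiaco():
--     elementos = ["madera", "fuego", "tierra", "metal", "agua"]
--     animales = ["rata", "buey", "tigre", "conejo","dragón", "serpiente", "caballo","oveja","mono","gallo","perro","cerdo"]
--     zodiaco = {}
--     cont=0
--     i=0
--     j=0
--     for anno in range(1924,1984):
--         if j==len(animales):
--             j=0
--         if i==len(elementos):
--             i=0
--         if cont<2:
--             cont+=1
--             zodiaco[anno]=[elementos[i],animales[j]]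
--         if cont==2:
--             cont=0
--             i+=1
--         j+=1
--     return zodiaco
--
-- def sexagenarioChino(anno):
--     zodiaco=crearZodiaco()
--     enc=False
--     lista=list(zodiaco.keys())
--     i=0
--     if anno in lista:
--         return zodiaco[anno]
--     while i<len(lista) and not enc:
--         if abs(lista[i]-anno)%60==0:
--             enc=True
--         else:
--             i+=1
--     return zodiaco[lista[i]]
-- ===== SOURCE B (Python) =====
-- def sexagenarioChino(anno):
--     elementos = ["madera", "fuego", "tierra", "metal", "agua"]
--     animales = ["rata", "buey", "tigre", "conejo","dragón", "serpiente", "caballo","oveja","mono","gallo","perro","cerdo"]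
--     idx = (anno - 1924) % 60
--     return [elementos[(idx // 2) % 5], animales[idx % 12]]
-- ===== Notes on version B (the rewrite author's own statement) =====
-- stated objective: simpler
-- what changed: Replaced the 60-entry table built by crearZodiaco plus a linear residue scan with a direct closed-form index: idx=(anno-1924)%60, element=elementos[(idx//2)%5], animal=animales[idx%12].
import Mathlib
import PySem

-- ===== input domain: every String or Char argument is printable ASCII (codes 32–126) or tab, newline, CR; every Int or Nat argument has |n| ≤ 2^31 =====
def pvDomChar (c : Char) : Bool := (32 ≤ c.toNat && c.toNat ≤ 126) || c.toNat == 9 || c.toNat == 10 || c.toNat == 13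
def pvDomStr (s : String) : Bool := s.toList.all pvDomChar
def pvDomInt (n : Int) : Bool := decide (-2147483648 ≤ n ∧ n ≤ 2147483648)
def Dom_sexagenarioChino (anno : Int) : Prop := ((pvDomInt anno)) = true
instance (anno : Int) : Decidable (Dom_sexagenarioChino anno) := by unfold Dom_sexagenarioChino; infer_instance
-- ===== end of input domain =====

-- B replaces A's 60-entry table build plus linear residue scan with a direct
-- modular-arithmetic formula (objective: simpler; return value only).

-- ===== PORT A =====
-- helper: builds the 1924..1983 zodiac table exactly as Python's crearZodiaco does
def crearZodiaco : PySem.Dict Int (List String) :=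
  ((PySem.List.pyRange 1924 1984 1).foldl
    (fun (st : PySem.Dict Int (List String) × Int × Int × Int) anno =>
      let zod := st.1
      let cont := st.2.1
      let i := st.2.2.1
      let j := st.2.2.2
      let j := if j == PySem.List.len ["rata", "buey", "tigre", "conejo", "dragón", "serpiente", "caballo", "oveja", "mono", "gallo", "perro", "cerdo"] then 0 else j
      let i := if i == PySem.List.len ["madera", "fuego", "tierra", "metal", "agua"] then 0 else i
      let zc := if cont < 2 then
          (zod.insert anno [PySem.List.pyGetD ["madera", "fuego", "tierra", "metal", "agua"] i "",
                            PySem.List.pyGetD ["rata", "buey", "tigre", "conejo", "dragón", "serpiente", "caballo", "oveja", "mono", "gallo", "perro", "cerdo"] j ""], cont + 1)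
        else (zod, cont)
      let zod := zc.1
      let cont := zc.2
      let ci := if cont == 2 then ((0 : Int), i + 1) else (cont, i)
      (zod, ci.1, ci.2, j + 1))
    (PySem.Dict.empty, 0, 0, 0)).1

-- helper: the while loop — walk the key list, return the first key with abs(key-anno)%60==0
-- (none = the loop falls off the end; Python would then raise IndexError at lista[i])
def scanKey (anno : Int) : List Int → Option Int
  | [] => none
  | k :: rest => if (k - anno).natAbs % 60 == 0 then some k else scanKey anno rest

def sexagenarioChino (anno : Int) : List String :=
  if crearZodiaco.keys.contains anno then crearZodiaco.getD anno []
  else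
    match scanKey anno crearZodiaco.keys with
    | some k => crearZodiaco.getD k []
    | none => []   -- unreachable (the keys cover every residue mod 60; proved below)

-- ===== PORT B =====
def sexagenarioChino_alt (anno : Int) : List String :=
  [PySem.List.pyGetD ["madera", "fuego", "tierra", "metal", "agua"]
     (PySem.Int.mod (PySem.Int.floordiv (PySem.Int.mod (anno - 1924) 60) 2) 5) "",
   PySem.List.pyGetD ["rata", "buey", "tigre", "conejo", "dragón", "serpiente", "caballo", "oveja", "mono", "gallo", "perro", "cerdo"]
     (PySem.Int.mod (PySem.Int.mod (anno - 1924) 60) 12) ""]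

-- ===== PRECONDITION & SPEC =====
def Spec_sexagenarioChino (anno : Int) (out : List String) : Prop := out = sexagenarioChino_alt anno
instance (anno : Int) (out : List String) : Decidable (Spec_sexagenarioChino anno out) := by unfold Spec_sexagenarioChino; infer_instance

-- ===== CLAIM (what is proved, stated in full; the proofs are below) =====
def Claim_equal_sexagenarioChino : Prop := ∀ (anno : Int), Dom_sexagenarioChino anno → Spec_sexagenarioChino anno (sexagenarioChino anno)

-- ===== LEMMAS AND PROOFS =====

-- A's keys are exactly 1924..1983 (both sides concrete)
set_option maxRecDepth 100000 in
theorem keys_crearZodiaco : crearZodiaco.keys = (List.range' 0 60).map (fun k : Nat => ((1924 + k : Nat) : Int)) := by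
  decide

-- the scan over consecutive keys finds exactly the key 1924 + (anno-1924) % 60
theorem scanKey_range' (anno : Int) (n s : Nat)
    (hs : (s : Int) ≤ (anno - 1924) % 60) (hn : (anno - 1924) % 60 < (s : Int) + n) :
    scanKey anno ((List.range' s n).map (fun k : Nat => ((1924 + k : Nat) : Int)))
      = some (1924 + (anno - 1924) % 60) := by
  induction n generalizing s with
  | zero => exfalso; omega
  | succ n ih =>
    rw [List.range'_succ, List.map_cons]
    unfold scanKey
    by_cases h : (((1924 + s : Nat) : Int) - anno).natAbs % 60 = 0
    · have hsr : ((s : Int)) = (anno - 1924) % 60 := by omega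
      have he : ((1924 + s : Nat) : Int) = 1924 + (anno - 1924) % 60 := by push_cast; omega
      rw [he] at h ⊢
      simp [h]
    · have hrec := ih (s + 1) (by push_cast; omega) (by push_cast; omega)
      simp only [beq_iff_eq, h, if_false]
      exact hrec

-- the per-residue agreement of A's table with B's formula, checked on all 60 residues
set_option maxRecDepth 100000 in
theorem table_eq_formula : ∀ k ∈ List.range 60,
    crearZodiaco.getD (1924 + (k : Int)) [] = sexagenarioChino_alt (1924 + (k : Int)) := by
  decide

-- ===== VERDICT (by name: the statement is the Claim_ definition above) =====
set_option maxRecDepth 100000 in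
theorem sexagenarioChino_spec : Claim_equal_sexagenarioChino := by
  intro anno _
  show sexagenarioChino anno = sexagenarioChino_alt anno
  set r : Int := (anno - 1924) % 60 with hr
  have hr0 : 0 ≤ r := Int.emod_nonneg _ (by norm_num)
  have hr60 : r < 60 := Int.emod_lt_of_pos _ (by norm_num)
  -- B depends only on r
  have haltr : sexagenarioChino_alt anno = sexagenarioChino_alt (1924 + r) := by
    have h1 : PySem.Int.mod (anno - 1924) 60 = r := by
      rw [PySem.Int.mod_eq_emod_of_pos (by norm_num)]
    have h2 : PySem.Int.mod (1924 + r - 1924) 60 = r := by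
      rw [PySem.Int.mod_eq_emod_of_pos (by norm_num)]
      omega
    unfold sexagenarioChino_alt
    rw [h1, h2]
  -- A's result is the table lookup at 1924 + r
  have hA : sexagenarioChino anno = crearZodiaco.getD (1924 + r) [] := by
    unfold sexagenarioChino
    rw [keys_crearZodiaco]
    split_ifs with hmem
    · have hmem' : anno ∈ (List.range' 0 60).map (fun k : Nat => ((1924 + k : Nat) : Int)) :=
        List.mem_of_elem_eq_true hmem
      have hb : 1924 ≤ anno ∧ anno < 1984 := by
        simp only [List.mem_map, List.mem_range'_1] at hmem'
        obtain ⟨k, hk, hke⟩ := hmem'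
        omega
      have he : 1924 + r = anno := by omega
      rw [he]
    · rw [scanKey_range' anno 60 0 (by omega) (by push_cast; omega)]
  rw [hA, haltr]
  have hk : r.toNat ∈ List.range 60 := by
    rw [List.mem_range]; omega
  have ht := table_eq_formula r.toNat hk
  have hcast : ((r.toNat : Int)) = r := by omega
  rwa [hcast] at ht
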